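-- pv_equiv track=rewrite | github.com/bromberglab/webservice-server | django/app/files.py | find_prefix
-- ===== SOURCE A (Python) =====
-- def filter_start(items, prefix):
--     """ from a list of strings, return those that start with prefix """
--     items = filter(lambda i: i.startswith(prefix), items)
--
--     return list(items)
--
-- def find_prefix(splits, files):
--     """
--     Tries to guess a common prefix for files in a directory,
--     with a single file as a basis.
--     splits: Pre-split filename, split according to a list of delimiters. The
--             list should include all delimiters as separate entities.
--             abc.txt would become [abc . txt]
--     files: All files in this directory.
--     """
--     n = len(files)
--     files.sort()
--     prev_prefix = prefix = "".join(splits[:1])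
--     splits = splits[1:]
--
--     while (
--         len(filter_start(files, prev_prefix)) == n
--         or len(filter_start(files, prefix)) > 1
--     ) and len(splits):
--         prev_prefix = prefix
--         prefix += "".join(splits[:2])
--         splits = splits[2:]
--
--     return prev_prefix
-- ===== SOURCE B (Python) =====
-- def _bisect_left(a, x):
--     lo, hi = 0, len(a)
--     while lo < hi:
--         mid = (lo + hi) // 2
--         if a[mid] < x:
--             lo = mid + 1
--         else:
--             hi = mid
--     return lo
--
-- def find_prefix(splits, files):
--     """
--     Same result as the original, but after sorting the checks are O(L log n):
--     'all files share prefix p' is decided by the first and last file alone, and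
--     'more than one file starts with p' by binary-searching the first file >= p
--     and looking at it and its successor (matching files are contiguous when sorted).
--     """
--     files.sort()
--     n = len(files)
--     prev_prefix = prefix = "".join(splits[:1])
--     splits = splits[1:]
--     while splits:
--         if not (n == 0 or (files[0].startswith(prev_prefix)
--                            and files[-1].startswith(prev_prefix))):
--             lo = _bisect_left(files, prefix)
--             if not (lo + 1 < n and files[lo].startswith(prefix)
--                     and files[lo + 1].startswith(prefix)):
--                 break
--         prev_prefix = prefix
--         prefix += "".join(splits[:2])
--         splits = splits[2:]
--     return prev_prefix
-- ===== Notes on version B (the rewrite author's own statement) =====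
-- stated objective: faster
-- what changed: Each loop step's two linear scans over all files (filter by prefix, twice) are replaced by O(length + log n) checks on the sorted list: 'all files share the prefix' is read off the first and last file, and 'more than one file starts with the prefix' by binary-searching the first file >= prefix and inspecting it and its successor, using that matching files are contiguous in sorted order.
import Mathlib
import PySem

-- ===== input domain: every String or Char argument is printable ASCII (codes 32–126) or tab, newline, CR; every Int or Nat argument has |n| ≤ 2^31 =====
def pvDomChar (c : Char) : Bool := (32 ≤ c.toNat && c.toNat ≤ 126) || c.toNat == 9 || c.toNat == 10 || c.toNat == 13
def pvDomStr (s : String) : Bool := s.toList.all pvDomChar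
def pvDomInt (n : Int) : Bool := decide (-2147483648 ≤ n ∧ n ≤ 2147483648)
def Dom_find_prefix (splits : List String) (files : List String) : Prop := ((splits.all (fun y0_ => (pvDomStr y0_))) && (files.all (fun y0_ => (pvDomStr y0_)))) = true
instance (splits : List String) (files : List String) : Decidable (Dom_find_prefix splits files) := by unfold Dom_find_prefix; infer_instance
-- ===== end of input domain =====

-- B replaces A's per-step linear scans (filtering all files by the prefix, twice) with
-- O(L + log n) checks on the sorted list (first/last file, and binary search for the first
-- file ≥ prefix); both A and B sort `files` in place in Python, so the equivalence proved
-- here is about the return value.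

-- ===== PORT A =====
def filter_start (items : List String) (pfx : String) : List String :=
  items.filter (fun i => PySem.Str.startswith i pfx)

-- prefix += "".join(splits[:2])  (shared verbatim by both Pythons' loop bodies)
def stepPrefix (pre : String) (splits : List String) : String :=
  PySem.Str.join "" [pre, PySem.Str.join "" (PySem.List.slice splits none (some 2))]

-- the while loop of A: state (prev_prefix, prefix, splits)
def findLoopA (files : List String) (n : Nat) (prev pre : String) (splits : List String) : String :=
  if ((filter_start files prev).length == n || decide (1 < (filter_start files pre).length))
      && !splits.isEmpty then
    findLoopA files n pre (stepPrefix pre splits) (PySem.List.slice splits (some 2) none)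
  else prev
termination_by splits.length
decreasing_by
  rename_i h
  rw [PySem.List.slice_from splits (by norm_num)]
  cases splits with
  | nil => simp at h
  | cons x xs => simp

def find_prefix (splits : List String) (files : List String) : String :=
  let n := files.length
  let files' := PySem.List.sorted files (fun x => x)
  let prev := PySem.Str.join "" (PySem.List.slice splits none (some 1))
  findLoopA files' n prev prev (PySem.List.slice splits (some 1) none)

-- ===== PORT B =====
-- hand-written bisect_left of Source B: while lo < hi: mid = (lo+hi)//2; …  (fuel = initial hi - lo)
def bisectLoopB (a : List String) (x : String) : Nat → Nat → Nat → Nat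
  | 0, lo, _ => lo
  | fuel+1, lo, hi =>
    if lo < hi then
      if PySem.List.pyGetD a (((lo + hi) / 2 : Nat) : Int) "" < x then
        bisectLoopB a x fuel ((lo + hi) / 2 + 1) hi
      else
        bisectLoopB a x fuel lo ((lo + hi) / 2)
    else lo

def pyBisectLeft (a : List String) (x : String) : Nat :=
  bisectLoopB a x a.length 0 a.length

-- n == 0 or (files[0].startswith(p) and files[-1].startswith(p))
def allFilesCheck (files : List String) (n : Nat) (p : String) : Bool :=
  n == 0 || (PySem.Str.startswith (PySem.List.pyGetD files 0 "") p
              && PySem.Str.startswith (PySem.List.pyGetD files (-1) "") p)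

-- lo = bisect_left(files, p); lo + 1 < n and files[lo].startswith(p) and files[lo+1].startswith(p)
def manyCheck (files : List String) (n : Nat) (p : String) : Bool :=
  let lo := pyBisectLeft files p
  decide (lo + 1 < n)
    && PySem.Str.startswith (PySem.List.pyGetD files (lo : Int) "") p
    && PySem.Str.startswith (PySem.List.pyGetD files ((lo : Int) + 1) "") p

-- the while loop of B: 'if not all: (if not many: break)' then the shared body
def findLoopB (files : List String) (n : Nat) (prev pre : String) : List String → String
  | [] => prev
  | x :: xs =>
    if allFilesCheck files n prev then
      findLoopB files n pre (stepPrefix pre (x :: xs)) (PySem.List.slice (x :: xs) (some 2) none)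
    else if manyCheck files n pre then
      findLoopB files n pre (stepPrefix pre (x :: xs)) (PySem.List.slice (x :: xs) (some 2) none)
    else prev
termination_by l => l.length
decreasing_by
  all_goals
    rw [PySem.List.slice_from _ (by norm_num)]
    simp

def find_prefix_alt (splits : List String) (files : List String) : String :=
  let files' := PySem.List.sorted files (fun x => x)
  let n := files'.length
  let prev := PySem.Str.join "" (PySem.List.slice splits none (some 1))
  findLoopB files' n prev prev (PySem.List.slice splits (some 1) none)

-- ===== PRECONDITION & SPEC =====
def Spec_find_prefix (splits : List String) (files : List String) (out : String) : Prop := out = find_prefix_alt splits files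
instance (splits : List String) (files : List String) (out : String) : Decidable (Spec_find_prefix splits files out) := by unfold Spec_find_prefix; infer_instance

-- ===== CLAIM (what is proved, stated in full; the proofs are below) =====
def Claim_equal_find_prefix : Prop := ∀ (splits : List String) (files : List String), Dom_find_prefix splits files → Spec_find_prefix splits files (find_prefix splits files)

-- ===== LEMMAS AND PROOFS =====

theorem str_lt_iff_lex (s t : String) : s < t ↔ List.Lex (· < ·) s.toList t.toList := by
  rw [String.lt_iff_toList_lt]; exact List.lt_iff_lex_lt _ _

theorem not_lex_of_prefix (p s : List Char) (h : p <+: s) : ¬ List.Lex (· < ·) s p := by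
  induction p generalizing s with
  | nil => intro hl; cases hl
  | cons c p' ih =>
    obtain ⟨t, rfl⟩ := h
    intro hl
    cases hl with
    | cons h' => exact ih (p' ++ t) ⟨t, rfl⟩ h'
    | rel h' => exact lt_irrefl _ h'

theorem le_of_prefix_str (p s : String) (h : p.toList <+: s.toList) : p ≤ s :=
  not_lt.mp (fun h' => not_lex_of_prefix _ _ h ((str_lt_iff_lex s p).mp h'))

theorem lex_convex (p : List Char) : ∀ (s b : List Char), ¬ List.Lex (· < ·) s p →
    ¬ List.Lex (· < ·) b s → p <+: b → p <+: s := by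
  induction p with
  | nil => intro s b _ _ _; exact List.nil_prefix
  | cons c p' ih =>
    intro s b hsp hbs hpb
    obtain ⟨t, rfl⟩ := hpb
    cases s with
    | nil => exact absurd List.Lex.nil hsp
    | cons d s' =>
      rcases lt_trichotomy c d with hcd | hcd | hcd
      · exact absurd (List.Lex.rel hcd) hbs
      · subst hcd
        have h1 : ¬ List.Lex (· < ·) s' p' := fun h => hsp (List.Lex.cons h)
        have h2 : ¬ List.Lex (· < ·) (p' ++ t) s' := fun h => hbs (List.Lex.cons h)
        obtain ⟨u, hu⟩ := ih s' (p' ++ t) h1 h2 ⟨t, rfl⟩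
        exact ⟨u, by rw [List.cons_append, hu]⟩
      · exact absurd (List.Lex.rel hcd) hsp

theorem convex_str (p s b : String) (h1 : p ≤ s) (h2 : s ≤ b)
    (h3 : p.toList <+: b.toList) : p.toList <+: s.toList :=
  lex_convex p.toList s.toList b.toList
    (fun h => absurd ((str_lt_iff_lex s p).mpr h) (not_lt.mpr h1))
    (fun h => absurd ((str_lt_iff_lex b s).mpr h) (not_lt.mpr h2)) h3

theorem starts_iff (s p : String) : PySem.Str.startswith s p = true ↔ p.toList <+: s.toList := by
  rw [PySem.Str.startswith_eq]; exact PySem.Chars.startswith_iff _ _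

theorem sorted_getElem_le (l : List String) (hs : l.Pairwise (· ≤ ·)) (i j : Nat)
    (hj : j < l.length) (hij : i ≤ j) : l[i]'(lt_of_le_of_lt hij hj) ≤ l[j] := by
  rcases eq_or_lt_of_le hij with rfl | h
  · exact le_refl _
  · exact List.pairwise_iff_getElem.mp hs i j _ hj h

theorem bisectLoopB_spec (xs : List String) (x : String) (hs : xs.Pairwise (· ≤ ·)) :
    ∀ (fuel lo hi : Nat), lo ≤ hi → hi ≤ xs.length → hi - lo ≤ fuel →
    (∀ j (hj : j < xs.length), j < lo → xs[j] < x) →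
    (∀ j (hj : j < xs.length), hi ≤ j → x ≤ xs[j]) →
    lo ≤ bisectLoopB xs x fuel lo hi ∧ bisectLoopB xs x fuel lo hi ≤ hi ∧
    (∀ j (hj : j < xs.length), j < bisectLoopB xs x fuel lo hi → xs[j] < x) ∧
    (∀ j (hj : j < xs.length), bisectLoopB xs x fuel lo hi ≤ j → x ≤ xs[j]) := by
  intro fuel
  induction fuel with
  | zero =>
    intro lo hi hlh hhl hf hbelow habove
    obtain rfl : lo = hi := by omega
    exact ⟨le_refl _, le_refl _, hbelow, habove⟩
  | succ fuel ih =>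
    intro lo hi hlh hhl hf hbelow habove
    by_cases hlt : lo < hi
    · have hmid : (lo + hi) / 2 < xs.length := by omega
      have hget : PySem.List.pyGetD xs (((lo + hi) / 2 : Nat) : Int) "" = xs[(lo + hi) / 2] := by
        rw [PySem.List.pyGetD_natCast]
        exact List.getD_eq_getElem xs "" hmid
      rw [bisectLoopB, if_pos hlt, hget]
      by_cases hc : xs[(lo + hi) / 2] < x
      · rw [if_pos hc]
        have h := ih ((lo + hi) / 2 + 1) hi (by omega) hhl (by omega)
          (fun j hj hjlt => by
            have : xs[j] ≤ xs[(lo + hi) / 2] := sorted_getElem_le xs hs j _ hmid (by omega)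
            exact lt_of_le_of_lt this hc)
          habove
        exact ⟨by omega, h.2.1, h.2.2⟩
      · rw [if_neg hc]
        have hxle : x ≤ xs[(lo + hi) / 2] := not_lt.mp hc
        have h := ih lo ((lo + hi) / 2) (by omega) (by omega) (by omega)
          hbelow
          (fun j hj hjge => le_trans hxle (sorted_getElem_le xs hs _ j hj hjge))
        exact ⟨h.1, by omega, h.2.2⟩
    · obtain rfl : lo = hi := by omega
      rw [bisectLoopB, if_neg hlt]
      exact ⟨le_refl _, le_refl _, hbelow, habove⟩

theorem pyBisectLeft_spec (xs : List String) (x : String) (hs : xs.Pairwise (· ≤ ·)) :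
    pyBisectLeft xs x ≤ xs.length ∧
    (∀ j (hj : j < xs.length), j < pyBisectLeft xs x → xs[j] < x) ∧
    (∀ j (hj : j < xs.length), pyBisectLeft xs x ≤ j → x ≤ xs[j]) := by
  have h := bisectLoopB_spec xs x hs xs.length 0 xs.length (by omega) (le_refl _) (by omega)
    (fun j hj hjlt => absurd hjlt (by omega))
    (fun j hj hjge => absurd hj (by omega))
  exact ⟨h.2.1, h.2.2⟩

-- startswith is downward closed along a sorted run bounded by a file that has the prefix
theorem star_of_between (p x b : String) (h1 : p ≤ x) (h2 : x ≤ b)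
    (hb : PySem.Str.startswith b p = true) : PySem.Str.startswith x p = true :=
  (starts_iff x p).mpr (convex_str p x b h1 h2 ((starts_iff b p).mp hb))

-- the Bool condition "all n files start with p" of A equals B's first/last check, on a sorted list
theorem allCheck_eq (files : List String) (p : String) (hs : files.Pairwise (· ≤ ·)) :
    ((filter_start files p).length == files.length) = allFilesCheck files files.length p := by
  rw [Bool.eq_iff_iff]
  unfold filter_start allFilesCheck
  cases files with
  | nil => simp
  | cons y ys =>
    have hne : y :: ys ≠ [] := List.cons_ne_nil y ys
    have hn0 : ((y :: ys).length == 0) = false := by simp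
    rw [hn0, Bool.false_or, PySem.List.pyGetD_neg_one (xs := y :: ys) "" hne,
      PySem.List.pyGetD_zero_cons]
    simp only [beq_iff_eq, Bool.and_eq_true]
    rw [List.length_filter_eq_length_iff]
    constructor
    · intro hall
      exact ⟨hall y List.mem_cons_self, hall _ (List.getLast_mem hne)⟩
    · rintro ⟨hy, hlast⟩ x hx
      obtain ⟨i, hi, rfl⟩ := List.mem_iff_getElem.mp hx
      have h0 : (y :: ys)[0] ≤ (y :: ys)[i] := sorted_getElem_le _ hs 0 i hi (by omega)
      have hN : (y :: ys)[i] ≤ (y :: ys)[(y :: ys).length - 1] :=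
        sorted_getElem_le _ hs i _ (by simp) (by omega)
      have hp0 : p ≤ (y :: ys)[0] := le_of_prefix_str p _ ((starts_iff _ p).mp hy)
      rw [List.getLast_eq_getElem hne] at hlast
      exact star_of_between p _ _ (le_trans hp0 h0) hN hlast

-- the Bool condition "more than one file starts with p" of A equals B's bisect check, on a sorted list
theorem manyCheck_eq (files : List String) (p : String) (hs : files.Pairwise (· ≤ ·)) :
    (decide (1 < (filter_start files p).length)) = manyCheck files files.length p := by
  obtain ⟨hle, hbelow, habove⟩ := pyBisectLeft_spec files p hs
  set f : String → Bool := fun i => PySem.Str.startswith i p with hf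
  set lo := pyBisectLeft files p with hlo
  have hcount : (filter_start files p).length = files.countP f :=
    (List.countP_eq_length_filter).symm
  rw [Bool.eq_iff_iff]
  unfold manyCheck
  rw [← hlo]
  simp only [decide_eq_true_iff, Bool.and_eq_true, hcount]
  constructor
  · intro h2
    -- no file before index lo starts with p
    have htake : (files.take lo).countP f = 0 := by
      rw [List.countP_eq_zero]
      intro x hx hfx
      obtain ⟨j, hj, rfl⟩ := List.mem_take_iff_getElem.mp hx
      have hplt : files[j] < p := hbelow j (by omega) (by omega)
      have hple : p ≤ files[j] := le_of_prefix_str p _ ((starts_iff _ p).mp hfx)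
      exact absurd hplt (not_lt.mpr hple)
    have hsplit : files.countP f = (files.take lo).countP f + (files.drop lo).countP f := by
      conv_lhs => rw [← List.take_append_drop lo files]
      rw [List.countP_append]
    have hdc : 1 < (files.drop lo).countP f := by omega
    have hlo_lt : lo < files.length := by
      rcases Nat.lt_or_ge lo files.length with h | h
      · exact h
      · exfalso
        rw [List.drop_eq_nil_of_le h] at hdc
        simp at hdc
    rw [List.drop_eq_getElem_cons hlo_lt, List.countP_cons] at hdc
    have hdc1 : 0 < (files.drop (lo + 1)).countP f := by
      by_cases hfa : f files[lo] = true
      · rw [if_pos hfa] at hdc; omega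
      · rw [if_neg hfa] at hdc; omega
    obtain ⟨y, hy, hfy⟩ := List.countP_pos_iff.mp hdc1
    obtain ⟨i, hi, rfl⟩ := List.mem_iff_getElem.mp hy
    rw [List.getElem_drop] at hfy
    have hj : lo + 1 + i < files.length := by
      have := List.length_drop (l := files) (i := lo + 1)
      omega
    have hlo1_lt : lo + 1 < files.length := by omega
    have hstar_lo : f files[lo] = true :=
      star_of_between p _ _ (habove lo hlo_lt (le_refl _))
        (sorted_getElem_le _ hs lo _ hj (by omega)) hfy
    have hstar_lo1 : f files[lo + 1] = true :=
      star_of_between p _ _ (habove (lo + 1) hlo1_lt (by omega))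
        (sorted_getElem_le _ hs (lo + 1) _ hj (by omega)) hfy
    refine ⟨⟨hlo1_lt, ?_⟩, ?_⟩
    · rw [PySem.List.pyGetD_natCast]
      rw [List.getD_eq_getElem files "" hlo_lt]
      exact hstar_lo
    · have : ((lo : Int) + 1) = ((lo + 1 : Nat) : Int) := by push_cast; ring
      rw [this, PySem.List.pyGetD_natCast, List.getD_eq_getElem files "" hlo1_lt]
      exact hstar_lo1
  · rintro ⟨⟨hlo1, hswlo⟩, hswlo1⟩
    have hlo_lt : lo < files.length := by omega
    rw [PySem.List.pyGetD_natCast, List.getD_eq_getElem files "" hlo_lt] at hswlo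
    have hcast : ((lo : Int) + 1) = ((lo + 1 : Nat) : Int) := by push_cast; ring
    rw [hcast, PySem.List.pyGetD_natCast, List.getD_eq_getElem files "" hlo1] at hswlo1
    have hdrop : files.drop lo = files[lo] :: files[lo + 1] :: files.drop (lo + 2) := by
      rw [List.drop_eq_getElem_cons hlo_lt, List.drop_eq_getElem_cons hlo1]
    have hmono : (files.drop lo).countP f ≤ files.countP f :=
      List.Sublist.countP_le (List.drop_sublist lo files)
    rw [hdrop, List.countP_cons, List.countP_cons, (show f files[lo] = true from hswlo),
      (show f files[lo + 1] = true from hswlo1)] at hmono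
    simp at hmono
    omega

theorem loop_eq (files : List String) (hs : files.Pairwise (· ≤ ·)) :
    ∀ (k : Nat) (splits : List String), splits.length ≤ k → ∀ (prev pre : String),
    findLoopA files files.length prev pre splits = findLoopB files files.length prev pre splits := by
  intro k
  induction k with
  | zero =>
    intro splits hl prev pre
    obtain rfl : splits = [] := List.eq_nil_of_length_eq_zero (by omega)
    rw [findLoopA]
    simp [findLoopB]
  | succ k ih =>
    intro splits hl prev pre
    cases splits with
    | nil =>
      rw [findLoopA]
      simp [findLoopB]
    | cons x xs =>
      have hlen2 : (PySem.List.slice (x :: xs) (some 2) none).length ≤ k := by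
        rw [PySem.List.slice_from _ (by norm_num)]
        simp at hl ⊢
        omega
      rw [findLoopA, allCheck_eq files prev hs, manyCheck_eq files pre hs]
      simp only [List.isEmpty_cons, Bool.not_false, Bool.and_true]
      rw [findLoopB]
      by_cases hall : allFilesCheck files files.length prev = true
      · simp only [hall, Bool.true_or, if_true]
        exact ih _ hlen2 pre (stepPrefix pre (x :: xs))
      · rw [Bool.not_eq_true] at hall
        by_cases hmany : manyCheck files files.length pre = true
        · simp only [hall, hmany, Bool.false_or, if_true]
          exact ih _ hlen2 pre (stepPrefix pre (x :: xs))
        · rw [Bool.not_eq_true] at hmany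
          simp [hall, hmany]

-- ===== VERDICT (by name: the statement is the Claim_ definition above) =====
theorem find_prefix_spec : Claim_equal_find_prefix := by
  intro splits files _
  unfold Spec_find_prefix find_prefix find_prefix_alt
  have hlen : (PySem.List.sorted files (fun x => x)).length = files.length :=
    PySem.List.length_sorted files _ _
  have hs : (PySem.List.sorted files (fun x => x)).Pairwise (· ≤ ·) :=
    PySem.List.sorted_pairwise files (fun x => x)
  simp only [hlen.symm]
  exact loop_eq _ hs _ _ (le_refl _) _ _
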